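-- pv_equiv track=rewrite | github.com/rzgdmqt/Projekt-PROG1 | orodja.py | purify_content
-- ===== SOURCE A (Python) =====
-- def purify_content(vsebina):
--     """Počisti vsebino."""
--     vsebina = vsebina.split('span id="freeText')
--     besedilo = ''
--     if not vsebina:
--         return besedilo
--     v_besedilu = False
--     vsebina = vsebina[-1]
--     for i in vsebina:
--         if i == '\n':
--             break
--         elif i in "<>":
--             v_besedilu = not v_besedilu
--             continue
--         if v_besedilu:
--             besedilo += i
--     return besedilo
-- ===== SOURCE B (Python) =====
-- def purify_content(vsebina):
--     """Počisti vsebino."""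
--     seg = vsebina.split('span id="freeText')[-1].split('\n')[0]
--     parts = seg.replace('>', '<').split('<')
--     return ''.join(parts[1::2])
-- ===== Notes on version B (the rewrite author's own statement) =====
-- stated objective: simpler
-- what changed: Replaced the per-character toggle state machine with a split-and-select pipeline: truncate at the first newline, split the segment on angle brackets, and join the odd-indexed pieces (the bracket work moves into C-level str.split/join, a constant-factor speedup).
import Mathlib
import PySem

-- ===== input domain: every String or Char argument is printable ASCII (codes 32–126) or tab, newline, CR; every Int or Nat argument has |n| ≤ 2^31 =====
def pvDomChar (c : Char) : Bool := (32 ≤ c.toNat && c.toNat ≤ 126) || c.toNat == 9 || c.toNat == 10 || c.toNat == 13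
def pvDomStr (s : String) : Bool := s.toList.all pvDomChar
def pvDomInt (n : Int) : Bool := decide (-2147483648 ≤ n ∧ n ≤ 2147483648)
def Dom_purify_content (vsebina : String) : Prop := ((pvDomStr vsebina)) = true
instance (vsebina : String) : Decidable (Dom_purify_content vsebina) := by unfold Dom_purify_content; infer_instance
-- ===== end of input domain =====

-- B replaces A's per-character toggle state machine by a split-and-select pipeline
-- (truncate at the first newline, split on angle brackets, join the odd-indexed pieces);
-- objective: simpler.

-- ===== PORT A =====
-- the for-loop of A: chars, toggle flag v_besedilu, accumulator besedilo; break at '\n'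
def purifyLoop : List Char → Bool → List Char → List Char
  | [], _, acc => acc
  | c :: rest, v, acc =>
    if c = '\n' then acc
    else if c = '<' ∨ c = '>' then purifyLoop rest (!v) acc
    else if v then purifyLoop rest v (acc ++ [c]) else purifyLoop rest v acc

def purify_content (vsebina : String) : String :=
  let parts := PySem.Chars.splitOn vsebina.toList ("span id=\"freeText".toList)
  let besedilo : List Char := []
  if parts = [] then String.ofList besedilo
  else
    let seg := PySem.List.pyGetD parts (-1) []
    String.ofList (purifyLoop seg false besedilo)

-- ===== PORT B =====
def purify_content_alt (vsebina : String) : String :=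
  let seg := PySem.List.pyGetD (PySem.Chars.splitOn vsebina.toList ("span id=\"freeText".toList)) (-1) []
  let seg0 := PySem.List.pyGetD (PySem.Chars.splitOn seg ['\n']) 0 []
  let bparts := PySem.Chars.splitOn (PySem.Chars.replace seg0 ['>'] ['<']) ['<']
  String.ofList (PySem.Chars.join [] ((PySem.List.slice? bparts (some 1) none 2).getD []))

-- ===== PRECONDITION & SPEC =====
def Spec_purify_content (vsebina : String) (out : String) : Prop := out = purify_content_alt vsebina
instance (vsebina : String) (out : String) : Decidable (Spec_purify_content vsebina out) := by unfold Spec_purify_content; infer_instance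

-- ===== CLAIM (what is proved, stated in full; the proofs are below) =====
def Claim_equal_purify_content : Prop := ∀ (vsebina : String), Dom_purify_content vsebina → Spec_purify_content vsebina (purify_content vsebina)

-- ===== LEMMAS AND PROOFS =====

-- reference split on a single character (never returns [])
def msplit (b : Char) : List Char → List (List Char)
  | [] => [[]]
  | c :: t => if c = b then [] :: msplit b t
              else (c :: (msplit b t).headI) :: (msplit b t).tail

lemma msplit_ne_nil (b : Char) (l : List Char) : msplit b l ≠ [] := by
  cases l with
  | nil => simp [msplit]
  | cons c t => by_cases h : c = b <;> simp [msplit, h]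

-- PySem.Chars.splitOn with a single-character separator is msplit
lemma splitOn_go_single (b : Char) :
    ∀ (fuel : Nat) (l cur : List Char) (acc : List (List Char)), l.length < fuel →
      PySem.Chars.splitOn.go [b] fuel l cur acc
        = acc.reverse ++ (cur.reverse ++ (msplit b l).headI) :: (msplit b l).tail := by
  intro fuel
  induction fuel with
  | zero => intro l cur acc h; omega
  | succ n ih =>
    intro l cur acc h
    cases l with
    | nil => simp [PySem.Chars.splitOn.go, msplit]
    | cons c t =>
      by_cases hc : c = b
      · subst hc
        have : [c].isPrefixOf (c :: t) = true := by simp [List.isPrefixOf]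
        simp only [PySem.Chars.splitOn.go, this, if_pos]
        have hd : List.drop [c].length (c :: t) = t := rfl
        rw [hd, ih t [] ((cur.reverse) :: acc) (by simp at h ⊢; omega)]
        cases hm : msplit c t with
        | nil => exact absurd hm (msplit_ne_nil c t)
        | cons p ps => simp [msplit, hm]
      · have : [b].isPrefixOf (c :: t) = false := by
          simp [List.isPrefixOf]; exact fun hcb => hc hcb.symm
        simp only [PySem.Chars.splitOn.go, this, Bool.false_eq_true, if_false]
        rw [ih t (c :: cur) acc (by simp at h ⊢; omega)]
        simp [msplit, hc]

lemma splitOn_single (b : Char) (l : List Char) :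
    PySem.Chars.splitOn l [b] = msplit b l := by
  unfold PySem.Chars.splitOn
  rw [splitOn_go_single b (l.length + 1) l [] [] (by omega)]
  have := msplit_ne_nil b l
  cases hm : msplit b l with
  | nil => exact absurd hm this
  | cons p ps => simp

-- single-character replace is map
def repl (c : Char) : Char := if c = '>' then '<' else c

lemma replace_go_single :
    ∀ (fuel : Nat) (l acc : List Char), l.length ≤ fuel →
      PySem.Chars.replace.go ['>'] ['<'] fuel l acc = acc.reverse ++ l.map repl := by
  intro fuel
  induction fuel with
  | zero =>
    intro l acc h
    cases l with
    | nil => simp [PySem.Chars.replace.go]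
    | cons c t => simp at h
  | succ n ih =>
    intro l acc h
    cases l with
    | nil => simp [PySem.Chars.replace.go]
    | cons c t =>
      by_cases hc : c = '>'
      · subst hc
        have : ['>'].isPrefixOf ('>' :: t) = true := by simp [List.isPrefixOf]
        simp only [PySem.Chars.replace.go, this, if_pos]
        have hd : List.drop ['>'].length ('>' :: t) = t := rfl
        have hr : (['<'].reverse ++ acc) = '<' :: acc := rfl
        rw [hd, hr, ih t ('<' :: acc) (by simp at h ⊢; omega)]
        simp [repl]
      · have : ['>'].isPrefixOf (c :: t) = false := by
          simp [List.isPrefixOf]; exact fun hcb => hc hcb.symm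
        simp only [PySem.Chars.replace.go, this, Bool.false_eq_true, if_false]
        rw [ih t (c :: acc) (by simp at h ⊢; omega)]
        simp [repl, hc]

lemma replace_single (l : List Char) :
    PySem.Chars.replace l ['>'] ['<'] = l.map repl := by
  unfold PySem.Chars.replace
  simp only [List.isEmpty_cons, Bool.false_eq_true, if_false]
  exact replace_go_single l.length l [] le_rfl

-- head of the newline split is takeWhile (· ≠ '\n')
lemma msplit_headI_newline (l : List Char) :
    (msplit '\n' l).headI = l.takeWhile (· ≠ '\n') := by
  induction l with
  | nil => rfl
  | cons c t ih =>
    by_cases hc : c = '\n'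
    · simp [msplit, hc, List.takeWhile]
    · simp [msplit, hc, List.takeWhile, ih]

-- the odd-indexed elements, and the [1::2] slice
def odds {α : Type} : List α → List α
  | [] => []
  | [_] => []
  | _ :: y :: t => y :: odds t

lemma filterMap_range_odds {α : Type} (xs : List α) :
    (List.range (xs.length / 2)).filterMap (fun (k : Nat) => xs[(1 + 2 * (k : Int)).toNat]?) = odds xs := by
  induction xs using odds.induct with
  | case1 => simp [odds]
  | case2 x => simp [odds]
  | case3 x y t ih =>
    have hlen : (x :: y :: t).length / 2 = t.length / 2 + 1 := by simp; omega
    rw [hlen, List.range_succ_eq_map]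
    rw [List.filterMap_cons, List.filterMap_map]
    have h0 : ((1 : Int) + 2 * ((0 : Nat) : Int)).toNat = 1 := by norm_num
    rw [h0]
    have hfun : ((fun k : Nat => (x :: y :: t)[((1:Int) + 2 * (k : Int)).toNat]?) ∘ Nat.succ)
        = fun k : Nat => t[((1:Int) + 2 * (k : Int)).toNat]? := by
      funext k
      have h1 : ((1 : Int) + 2 * ((k + 1 : Nat) : Int)).toNat = 2 * k + 3 := by omega
      have h2 : ((1 : Int) + 2 * ((k : Nat) : Int)).toNat = 2 * k + 1 := by omega
      simp only [Function.comp, Nat.succ_eq_add_one, h1, h2]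
      rfl
    rw [hfun]
    simp [odds, ih]

lemma slice?_one_two {α : Type} (xs : List α) :
    PySem.List.slice? xs (some 1) none 2 = some (odds xs) := by
  unfold PySem.List.slice? PySem.List.sliceIndices
  norm_num
  cases xs with
  | nil => simp [odds]
  | cons x t =>
    have hmin : min (1 : Int) (((x :: t).length : Int)) = 1 := by simp
    rw [hmin]
    have hcnt : (if 1 < (x :: t).length then ((((x :: t).length : Int) - 1 + 2 - 1) / 2).toNat else 0)
        = (x :: t).length / 2 := by
      by_cases h : 1 < (x :: t).length
      · rw [if_pos h]; omega
      · rw [if_neg h]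
        have : (x :: t).length = 1 := by simp at h ⊢; omega
        omega
    rw [hcnt]
    exact filterMap_range_odds (x :: t)

-- join with empty separator is flatten
lemma join_nil_flatten (l : List (List Char)) :
    PySem.Chars.join [] l = l.flatten := by
  unfold PySem.Chars.join
  induction l with
  | nil => simp [List.intercalate]
  | cons p ps ih =>
    cases ps with
    | nil => simp [List.intercalate]
    | cons q qs =>
      simp [List.intercalate, List.intersperse] at ih ⊢
      exact ih

-- the alternating selector: what A's toggle loop collects from the bracket split
def pick : Bool → List (List Char) → List Char
  | _, [] => []
  | b, p :: ps => (if b then p else []) ++ pick (!b) ps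

lemma pick_false_flatten_odds (ps : List (List Char)) :
    pick false ps = (odds ps).flatten := by
  induction ps using odds.induct with
  | case1 => simp [pick, odds]
  | case2 p => simp [pick, odds]
  | case3 p q t ih => simp [pick, odds, ih]

-- A's loop stops at the first newline
lemma purifyLoop_takeWhile (cs : List Char) :
    ∀ (v : Bool) (acc : List Char),
      purifyLoop cs v acc = purifyLoop (cs.takeWhile (· ≠ '\n')) v acc := by
  induction cs with
  | nil => intro v acc; simp
  | cons c t ih =>
    intro v acc
    by_cases hc : c = '\n'
    · subst hc; simp [purifyLoop, List.takeWhile]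
    · simp only [List.takeWhile, hc, decide_true, ne_eq, not_false_eq_true, decide_not]
      by_cases hb : c = '<' ∨ c = '>'
      · simp [purifyLoop, hc, hb, ih]
      · by_cases hv : v <;> simp [purifyLoop, hc, hb, hv, ih]

-- core invariant: A's toggle loop = the alternating selection from the '<' split of the replaced text
lemma purifyLoop_pick (cs : List Char) (h : '\n' ∉ cs) :
    ∀ (v : Bool) (acc : List Char),
      purifyLoop cs v acc = acc ++ pick v (msplit '<' (cs.map repl)) := by
  induction cs with
  | nil => intro v acc; simp [purifyLoop, msplit, pick]
  | cons c t ih =>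
    intro v acc
    have hc : c ≠ '\n' := by intro hh; exact h (hh ▸ List.mem_cons_self ..)
    have ht : '\n' ∉ t := fun hh => h (List.mem_cons_of_mem _ hh)
    by_cases hb : c = '<' ∨ c = '>'
    · have hr : repl c = '<' := by rcases hb with hb | hb <;> simp [repl, hb]
      simp only [purifyLoop, hc, if_false, hb, if_pos, List.map_cons, hr, msplit]
      rw [ih ht (!v) acc]
      simp [pick]
    · have hb2 : c ≠ '<' ∧ c ≠ '>' := by
        constructor <;> intro hh <;> exact hb (by simp [hh])
      have hr : repl c = c := by simp [repl, hb2.2]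
      simp only [purifyLoop, hc, if_false, List.map_cons, hr, msplit, hb2.1, hb2.2]
      have hms := msplit_ne_nil '<' (t.map repl)
      cases hm : msplit '<' (t.map repl) with
      | nil => exact absurd hm hms
      | cons p ps =>
        by_cases hv : v
        · subst hv
          simp only [if_pos]
          rw [ih ht true (acc ++ [c])]
          simp [pick, hm]
        · simp only [hv, if_false, Bool.false_eq_true]
          rw [ih ht false acc]
          simp [pick, hm]

lemma not_mem_takeWhile_newline (cs : List Char) : '\n' ∉ cs.takeWhile (· ≠ '\n') := by
  intro hmem
  have := List.mem_takeWhile_imp hmem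
  simp at this

-- the two pipelines agree on any segment
lemma seg_eq (seg : List Char) :
    purifyLoop seg false []
      = PySem.Chars.join []
          ((PySem.List.slice?
              (PySem.Chars.splitOn
                (PySem.Chars.replace (PySem.List.pyGetD (PySem.Chars.splitOn seg ['\n']) 0 []) ['>'] ['<'])
                ['<'])
              (some 1) none 2).getD []) := by
  have h0 : PySem.List.pyGetD (PySem.Chars.splitOn seg ['\n']) 0 []
      = seg.takeWhile (· ≠ '\n') := by
    rw [splitOn_single]
    have := msplit_ne_nil '\n' seg
    cases hm : msplit '\n' seg with
    | nil => exact absurd hm this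
    | cons p ps =>
      have : p = (msplit '\n' seg).headI := by rw [hm]; rfl
      rw [PySem.List.pyGetD_zero_cons, this, msplit_headI_newline]
  rw [h0, replace_single, splitOn_single, slice?_one_two]
  rw [purifyLoop_takeWhile, purifyLoop_pick _ (not_mem_takeWhile_newline seg)]
  simp only [List.nil_append]
  rw [pick_false_flatten_odds, join_nil_flatten, Option.getD_some]

-- ===== VERDICT (by name: the statement is the Claim_ definition above) =====
theorem purify_content_spec : Claim_equal_purify_content := by
  intro vsebina _
  unfold Spec_purify_content purify_content purify_content_alt
  simp only []
  by_cases hp : PySem.Chars.splitOn vsebina.toList ("span id=\"freeText".toList) = []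
  · rw [if_pos hp, hp]
    decide
  · rw [if_neg hp]
    rw [seg_eq]
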